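-- pv_equiv track=rewrite | github.com/jiachen0212/hope_better_job | code.py | max_one_area
-- ===== SOURCE A (Python) =====
-- def max_one_area(M):
--     ners = [[-1,-1],[-1,0],[-1,1],[0,-1],[0,1],[1,-1],[1,0],[1,1]] # 八邻域
--     # 偶尔也会四邻域  ners = [[-1,0],[0,-1],[0,1],[1,0]]
--     m = len(M)
--     n = len(M[0])
--     mmax = 0
--     visited = [[0]*n for i in range(m)]
--     for i in range(m):
--         for j in range(n):
--             count = 0
--             if M[i][j] and not visited[i][j]:
--                 count += 1
--                 visited[i][j] = 1
--                 queue = []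
--                 queue.append([i,j])
--                 while queue:
--                     cur = queue.pop(0)
--                     for ner in ners:
--                         x = cur[0]+ner[0]
--                         y = cur[1]+ner[1]
--                         if (x>=0 and y>=0 and x<m and y<n \
--                             and M[x][y] and not visited[x][y]):
--                             count += 1
--                             visited[x][y] = 1
--                             queue.append([x,y])
--             mmax = max(mmax, count)
--     return mmax
-- ===== SOURCE B (Python) =====
-- def max_one_area(M):
--     n = len(M[0])
--     m = len(M)
--     # label maps each 1-cell to the representative of its group (disjoint-set by relabeling)
--     label = {}
--     for i in range(m):
--         for j in range(n):
--             if M[i][j]: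
--                 label[(i, j)] = (i, j)
--     for (i, j) in list(label):
--         for di in (-1, 0, 1):
--             for dj in (-1, 0, 1):
--                 q = (i + di, j + dj)
--                 if (di or dj) and q in label:
--                     ra, rb = label[q], label[(i, j)]
--                     if ra != rb:
--                         label = {c: (rb if r == ra else r) for c, r in label.items()}
--     best = 0
--     counts = {}
--     for c in label:
--         r = label[c]
--         counts[r] = counts.get(r, 0) + 1
--         if counts[r] > best:
--             best = counts[r]
--     return best
-- ===== Notes on version B (the rewrite author's own statement) =====
-- stated objective: alternative
-- what changed: Replaces A's per-component BFS flood fill (queue + visited matrix) by a disjoint-set labeling: every 1-cell gets a representative label, one pass over all 1-cells merges the label classes of 8-adjacent 1-cells (relabeling the smaller-keyed class), and the answer is the largest label-class size counted at the end; no traversal, queue or visited structure at all.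
-- outside the precondition, e.g. on max_one_area([]): A raises IndexError, B raises IndexError; on max_one_area([[1, 1], [1]]): A raises IndexError, B raises IndexError
import Mathlib
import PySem

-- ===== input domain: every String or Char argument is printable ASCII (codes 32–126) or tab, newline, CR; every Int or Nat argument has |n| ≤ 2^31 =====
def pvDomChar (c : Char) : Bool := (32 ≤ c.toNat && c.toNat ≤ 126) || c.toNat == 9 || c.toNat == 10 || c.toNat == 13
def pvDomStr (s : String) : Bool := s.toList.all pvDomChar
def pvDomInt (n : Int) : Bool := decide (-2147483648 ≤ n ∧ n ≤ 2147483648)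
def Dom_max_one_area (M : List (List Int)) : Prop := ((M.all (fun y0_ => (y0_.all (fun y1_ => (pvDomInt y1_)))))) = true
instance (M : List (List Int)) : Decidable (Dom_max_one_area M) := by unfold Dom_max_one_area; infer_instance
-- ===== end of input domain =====

-- B replaces A's BFS flood fill (queue + visited matrix, one traversal per component) by a
-- disjoint-set labeling: every 1-cell gets a representative label, one pass over the 1-cells
-- merges the label classes of 8-adjacent 1-cells by relabeling, and the answer is the largest
-- label-class size (objective: alternative algorithm, no traversal structure at all).

-- shared read of the input grid M[x][y] (both Pythons read M the same way, after the
-- same bounds guard 0 ≤ x < m, 0 ≤ y < n, so getD is exact there)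
def pvGrid (M : List (List Int)) (x y : Int) : Int :=
  (M.getD x.toNat []).getD y.toNat 0

-- ===== PORT A =====
-- visited[x][y] read / write (guarded by the same bounds check in A)
def pvVis (v : List (List Int)) (x y : Int) : Int :=
  (v.getD x.toNat []).getD y.toNat 0
def pvMark (v : List (List Int)) (x y : Int) : List (List Int) :=
  v.set x.toNat ((v.getD x.toNat []).set y.toNat 1)

def offsA : List (Int × Int) :=
  [(-1,-1),(-1,0),(-1,1),(0,-1),(0,1),(1,-1),(1,0),(1,1)]

-- one neighbour test of A's inner `for ner in ners` loop; state = (visited, queue, count)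
def bfsStepA (M : List (List Int)) (m n : Int) (cur : Int × Int)
    (st : List (List Int) × List (Int × Int) × Int) (o : Int × Int) :
    List (List Int) × List (Int × Int) × Int :=
  let x := cur.1 + o.1
  let y := cur.2 + o.2
  if 0 ≤ x ∧ 0 ≤ y ∧ x < m ∧ y < n ∧ pvGrid M x y ≠ 0 ∧ pvVis st.1 x y = 0 then
    (pvMark st.1 x y, st.2.1 ++ [(x, y)], st.2.2 + 1)
  else st

-- A's `while queue:` loop; fuel only makes it total (the proof shows m*n+1 suffices)
def bfsA (M : List (List Int)) (m n : Int) :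
    Nat → List (Int × Int) → List (List Int) → Int → (List (List Int) × Int)
  | 0, _, v, c => (v, c)
  | _ + 1, [], v, c => (v, c)
  | fuel + 1, cur :: q, v, c =>
    let st := offsA.foldl (bfsStepA M m n cur) (v, q, c)
    bfsA M m n fuel st.2.1 st.1 st.2.2

-- the body of A's `for j in range(n)` loop (state = (visited, mmax))
def visitA (M : List (List Int)) (st : List (List Int) × Int) (i j : Nat) :
    List (List Int) × Int :=
  if pvGrid M i j ≠ 0 ∧ pvVis st.1 i j = 0 then
    let v1 := pvMark st.1 (i : Int) (j : Int)
    let r := bfsA M M.length M.headI.length (M.length * M.headI.length + 1)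
               [((i : Int), (j : Int))] v1 1
    (r.1, max st.2 r.2)
  else (st.1, max st.2 0)

def max_one_area (M : List (List Int)) : Int :=
  let m := M.length
  let n := M.headI.length
  let st := (List.range m).foldl (fun st i =>
    (List.range n).foldl (fun st j => visitA M st i j) st)
    (List.replicate m (List.replicate n (0 : Int)), 0)
  st.2

-- ===== PORT B =====
-- B's `label` build: label[(i,j)] = (i,j) for every 1-cell, in scan order
def labelInit (M : List (List Int)) : PySem.Dict (Int × Int) (Int × Int) :=
  (List.range M.length).foldl (fun d (i : Nat) =>
    (List.range M.headI.length).foldl (fun d (j : Nat) =>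
      if pvGrid M (i : Int) (j : Int) ≠ 0
      then d.insert ((i : Int), (j : Int)) ((i : Int), (j : Int)) else d) d)
    PySem.Dict.empty

-- one (di,dj) of B's union pass: merge the classes of q = c+(di,dj) and c by relabeling
def mergeStep (lab : PySem.Dict (Int × Int) (Int × Int)) (c : Int × Int) (d : Int × Int) :
    PySem.Dict (Int × Int) (Int × Int) :=
  if d.1 = 0 ∧ d.2 = 0 then lab
  else if lab.contains (c.1 + d.1, c.2 + d.2) then
    -- ra = label[q] (key present: guarded by `q in label`), rb = label[(i,j)] (key present)
    if lab.getD (c.1 + d.1, c.2 + d.2) (c.1 + d.1, c.2 + d.2) ≠ lab.getD c c then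
      PySem.Dict.mk (lab.items.map (fun kv =>
        (kv.1, if kv.2 = lab.getD (c.1 + d.1, c.2 + d.2) (c.1 + d.1, c.2 + d.2)
               then lab.getD c c else kv.2)))
    else lab
  else lab

-- B's two nested `for di/dj in (-1,0,1)` loops for one cell
def mergeCell (lab : PySem.Dict (Int × Int) (Int × Int)) (c : Int × Int) :
    PySem.Dict (Int × Int) (Int × Int) :=
  ([-1, 0, 1] : List Int).foldl (fun lab di =>
    ([-1, 0, 1] : List Int).foldl (fun lab dj => mergeStep lab c (di, dj)) lab) lab

-- B's final counting loop body; state = (counts, best)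
def countStep (lab : PySem.Dict (Int × Int) (Int × Int))
    (st : PySem.Dict (Int × Int) Int × Int) (c : Int × Int) :
    PySem.Dict (Int × Int) Int × Int :=
  let r := lab.getD c c
  let cnt := st.1.getD r 0 + 1
  (st.1.insert r cnt, if cnt > st.2 then cnt else st.2)

def max_one_area_alt (M : List (List Int)) : Int :=
  let label0 := labelInit M
  let label := label0.keys.foldl mergeCell label0
  let st := label.keys.foldl (countStep label) (PySem.Dict.empty, 0)
  st.2

-- ===== PRECONDITION & SPEC =====
-- Pre_ excludes exactly the inputs where Python A raises IndexError: the empty matrix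
-- (len(M[0])) and matrices with a row shorter than row 0 (M[x][y] with y < len(M[0])).
def Pre_max_one_area (M : List (List Int)) : Prop :=
  M ≠ [] ∧ ∀ r ∈ M, M.headI.length ≤ r.length
instance (M : List (List Int)) : Decidable (Pre_max_one_area M) := by
  unfold Pre_max_one_area; infer_instance

def pvWitness_max_one_area : List (List Int) := [[1, 0, 1], [1, 1, 0]]

def Spec_max_one_area (M : List (List Int)) (out : Int) : Prop := out = max_one_area_alt M
instance (M : List (List Int)) (out : Int) : Decidable (Spec_max_one_area M out) := by
  unfold Spec_max_one_area; infer_instance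

-- ===== CLAIM (what is proved, stated in full; the proofs are below) =====
def Claim_equal_max_one_area : Prop := ∀ (M : List (List Int)), Dom_max_one_area M → Pre_max_one_area M → Spec_max_one_area M (max_one_area M)

-- ===== LEMMAS AND PROOFS =====

-- ---- abstraction layer: the grid as a finite graph ----

-- a cell is admissible ("1"): in bounds and nonzero
def okB (M : List (List Int)) (p : Int × Int) : Bool :=
  decide (0 ≤ p.1 ∧ p.1 < (M.length : Int) ∧ 0 ≤ p.2 ∧ p.2 < (M.headI.length : Int) ∧
    pvGrid M p.1 p.2 ≠ 0)
def okC (M : List (List Int)) (p : Int × Int) : Prop := okB M p = true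

def cellsF (M : List (List Int)) : Finset (Int × Int) :=
  (Finset.range M.length ×ˢ Finset.range M.headI.length).image
    (fun p => ((p.1 : Int), (p.2 : Int)))

-- the visited matrix as a finite set of cells
def VA (M : List (List Int)) (v : List (List Int)) : Finset (Int × Int) :=
  (cellsF M).filter (fun p => pvVis v p.1 p.2 ≠ 0)

def shapeV (M : List (List Int)) (v : List (List Int)) : Prop :=
  v.length = M.length ∧ ∀ r ∈ v, r.length = M.headI.length

def nbrs (p : Int × Int) : List (Int × Int) :=
  offsA.map (fun o => (p.1 + o.1, p.2 + o.2))

-- reachability through ok cells avoiding the fixed set V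
inductive Rch (M : List (List Int)) (V : Finset (Int × Int)) :
    (Int × Int) → (Int × Int) → Prop
  | refl (x : Int × Int) : Rch M V x x
  | step {x y z : Int × Int} : Rch M V x y → z ∈ nbrs y → okC M z → z ∉ V → Rch M V x z

def RS (M : List (List Int)) (V W : Finset (Int × Int)) : Set (Int × Int) :=
  {x | ∃ w ∈ W, Rch M V w x}

-- the new cells discovered from neighbour candidates ns, given visited set V
def newsV (M : List (List Int)) (V : Finset (Int × Int)) (ns : List (Int × Int)) :
    List (Int × Int) :=
  ns.filter (fun x => okB M x && decide (x ∉ V))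

-- ---- basic facts ----

lemma okC_iff (M : List (List Int)) (p : Int × Int) :
    okC M p ↔ (0 ≤ p.1 ∧ p.1 < (M.length : Int) ∧ 0 ≤ p.2 ∧ p.2 < (M.headI.length : Int) ∧
      pvGrid M p.1 p.2 ≠ 0) := by
  simp [okC, okB]

lemma mem_cellsF (M : List (List Int)) (p : Int × Int) :
    p ∈ cellsF M ↔ (0 ≤ p.1 ∧ p.1 < (M.length : Int) ∧ 0 ≤ p.2 ∧ p.2 < (M.headI.length : Int)) := by
  simp only [cellsF, Finset.mem_image, Finset.mem_product, Finset.mem_range]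
  constructor
  · rintro ⟨⟨a, b⟩, ⟨ha, hb⟩, rfl⟩; simp; omega
  · rintro ⟨h1, h2, h3, h4⟩
    exact ⟨⟨p.1.toNat, p.2.toNat⟩, ⟨by omega, by omega⟩,
      by simp only [Int.toNat_of_nonneg h1, Int.toNat_of_nonneg h3]⟩

lemma okC_mem_cellsF (M : List (List Int)) (p : Int × Int) (h : okC M p) : p ∈ cellsF M := by
  rw [okC_iff] at h; rw [mem_cellsF]; tauto

lemma card_cellsF_le (M : List (List Int)) :
    (cellsF M).card ≤ M.length * M.headI.length := by
  calc (cellsF M).card ≤ (Finset.range M.length ×ˢ Finset.range M.headI.length).card :=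
        Finset.card_image_le
    _ = M.length * M.headI.length := by simp

lemma offsA_nodup : offsA.Nodup := by decide

lemma nbrs_nodup (p : Int × Int) : (nbrs p).Nodup := by
  refine List.Nodup.map ?_ offsA_nodup
  intro a b h
  simp only [Prod.mk.injEq] at h
  exact Prod.ext (by omega) (by omega)

lemma shapeV_mark (M : List (List Int)) (v : List (List Int)) (x y : Int)
    (hs : shapeV M v) : shapeV M (pvMark v x y) := by
  obtain ⟨hl, hr⟩ := hs
  unfold pvMark
  by_cases h : x.toNat < v.length
  · refine ⟨by simpa using hl, ?_⟩
    intro r hrm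
    rcases List.mem_or_eq_of_mem_set hrm with h1 | h1
    · exact hr r h1
    · subst h1
      rw [List.length_set]
      have : v.getD x.toNat [] = v[x.toNat] := by
        simp [List.getD_eq_getElem?_getD, List.getElem?_eq_getElem h]
      rw [this]
      exact hr _ (List.getElem_mem h)
  · rw [List.set_eq_of_length_le (by omega)]
    exact ⟨hl, hr⟩

lemma pvVis_mark_self (M : List (List Int)) (v : List (List Int)) (x y : Int)
    (hs : shapeV M v) (hx : 0 ≤ x) (hxm : x < (M.length : Int))
    (hy : 0 ≤ y) (hyn : y < (M.headI.length : Int)) :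
    pvVis (pvMark v x y) x y = 1 := by
  obtain ⟨hl, hr⟩ := hs
  have hxl : x.toNat < v.length := by omega
  have hrow : v.getD x.toNat [] = v[x.toNat] := by
    simp [List.getD_eq_getElem?_getD, List.getElem?_eq_getElem hxl]
  have hyl : y.toNat < (v[x.toNat]).length := by
    have := hr _ (List.getElem_mem hxl); omega
  unfold pvVis pvMark
  rw [hrow]
  have hset : (v.set x.toNat (v[x.toNat].set y.toNat 1)).getD x.toNat []
      = v[x.toNat].set y.toNat 1 := by
    rw [List.getD_eq_getElem?_getD, List.getElem?_set_self (by simpa using hxl),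
      Option.getD_some]
  rw [hset, List.getD_eq_getElem?_getD, List.getElem?_set_self (by simpa using hyl),
    Option.getD_some]

lemma pvVis_mark_ne (M : List (List Int)) (v : List (List Int)) (x y : Int)
    (q : Int × Int) (hq : q ∈ cellsF M) (hne : q ≠ (x, y))
    (hx : 0 ≤ x) (hy : 0 ≤ y) :
    pvVis (pvMark v x y) q.1 q.2 = pvVis v q.1 q.2 := by
  rw [mem_cellsF] at hq
  obtain ⟨h1, h2, h3, h4⟩ := hq
  unfold pvVis pvMark
  by_cases hrow : q.1.toNat = x.toNat
  · have hqy : q.2.toNat ≠ y.toNat := by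
      intro h; apply hne; exact Prod.ext (by omega) (by omega)
    rw [hrow]
    by_cases hxl : x.toNat < v.length
    · have hset : (v.set x.toNat ((v.getD x.toNat []).set y.toNat 1)).getD x.toNat []
          = (v.getD x.toNat []).set y.toNat 1 := by
        rw [List.getD_eq_getElem?_getD, List.getElem?_set_self (by simpa using hxl),
          Option.getD_some]
      rw [hset, List.getD_eq_getElem?_getD, List.getElem?_set_ne (by omega),
        ← List.getD_eq_getElem?_getD]
    · rw [List.set_eq_of_length_le (by omega)]
  · have houter : (v.set x.toNat ((v.getD x.toNat []).set y.toNat 1)).getD q.1.toNat []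
        = v.getD q.1.toNat [] := by
      rw [List.getD_eq_getElem?_getD, List.getElem?_set_ne (by omega),
        ← List.getD_eq_getElem?_getD]
    rw [houter]

lemma VA_mark (M : List (List Int)) (v : List (List Int)) (p : Int × Int)
    (hs : shapeV M v) (hp : p ∈ cellsF M) :
    VA M (pvMark v p.1 p.2) = insert p (VA M v) := by
  have hpb := (mem_cellsF M p).mp hp
  ext q
  simp only [VA, Finset.mem_filter, Finset.mem_insert]
  by_cases hq : q ∈ cellsF M
  · by_cases hqp : q = p
    · subst hqp
      simp only [hq, true_and]
      rw [pvVis_mark_self M v q.1 q.2 hs (by omega) (by omega) (by omega) (by omega)]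
      simp
    · rw [pvVis_mark_ne M v p.1 p.2 q hq (by simpa using hqp) (by omega) (by omega)]
      tauto
  · have hqp : q ≠ p := fun h => hq (h ▸ hp)
    simp [hq, hqp]

lemma not_mem_VA_iff (M : List (List Int)) (v : List (List Int)) (p : Int × Int)
    (hp : p ∈ cellsF M) : p ∉ VA M v ↔ pvVis v p.1 p.2 = 0 := by
  simp [VA, Finset.mem_filter, hp]

-- ---- reachability lemmas ----

lemma Rch_end (M : List (List Int)) (V : Finset (Int × Int)) {a b : Int × Int}
    (h : Rch M V a b) : b = a ∨ b ∉ V := by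
  induction h with
  | refl => left; rfl
  | step _ _ _ hz _ => right; exact hz

lemma Rch_mono (M : List (List Int)) {V V' : Finset (Int × Int)} (hVV : V ⊆ V')
    {a b : Int × Int} (h : Rch M V' a b) : Rch M V a b := by
  induction h with
  | refl => exact Rch.refl _
  | step _ hn hok hz ih => exact Rch.step ih hn hok (fun hb => hz (hVV hb))

lemma Rch_trans (M : List (List Int)) {V : Finset (Int × Int)} {a b c : Int × Int}
    (h1 : Rch M V a b) (h2 : Rch M V b c) : Rch M V a c := by
  induction h2 with
  | refl => exact h1
  | step _ hn hok hz ih => exact Rch.step ih hn hok hz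

-- the crux: one worklist step preserves "visited ∪ reachable-from-worklist"
lemma step_R_aux (M : List (List Int)) (V W N : Finset (Int × Int)) (w : Int × Int)
    (hw : w ∈ W) (hWV : ∀ x ∈ W, x ∈ V)
    (hN : ∀ x, x ∈ N ↔ x ∈ nbrs w ∧ okC M x ∧ x ∉ V)
    {a b : Int × Int} (h : Rch M V a b) (ha : a ∈ W) :
    b ∈ (↑(V ∪ N) ∪ RS M (V ∪ N) ((W.erase w) ∪ N) : Set (Int × Int)) := by
  induction h with
  | refl =>
    by_cases hww : a = w
    · subst hww; left; simp only [Finset.coe_union]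
      exact Set.mem_union_left _ (hWV _ ha)
    · right; exact ⟨a, Finset.mem_union_left _ (Finset.mem_erase.mpr ⟨hww, ha⟩), Rch.refl _⟩
  | @step b c hpre hn hok hnv ih =>
    by_cases hcN : c ∈ N
    · left; simp only [Finset.coe_union]
      exact Set.mem_union_right _ hcN
    · have hcVN : c ∉ V ∪ N := by simp [hnv, hcN]
      rcases ih with hb | ⟨w', hw', hr'⟩
      · simp only [Finset.coe_union, Set.mem_union, Finset.mem_coe] at hb
        rcases hb with hbV | hbN
        · rcases Rch_end M V hpre with rfl | hbnv
          · by_cases hww : b = w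
            · subst hww; exact absurd ((hN c).mpr ⟨hn, hok, hnv⟩) hcN
            · right
              exact ⟨b, Finset.mem_union_left _ (Finset.mem_erase.mpr ⟨hww, ha⟩),
                Rch.step (Rch.refl _) hn hok hcVN⟩
          · exact absurd hbV hbnv
        · right
          exact ⟨b, Finset.mem_union_right _ hbN, Rch.step (Rch.refl _) hn hok hcVN⟩
      · right; exact ⟨w', hw', Rch.step hr' hn hok hcVN⟩

lemma step_R (M : List (List Int)) (V W N : Finset (Int × Int)) (w : Int × Int)
    (hw : w ∈ W) (hWV : ∀ x ∈ W, x ∈ V)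
    (hN : ∀ x, x ∈ N ↔ x ∈ nbrs w ∧ okC M x ∧ x ∉ V) :
    (↑V ∪ RS M V W : Set (Int × Int)) = ↑(V ∪ N) ∪ RS M (V ∪ N) ((W.erase w) ∪ N) := by
  apply Set.eq_of_subset_of_subset
  · rintro x (hx | ⟨w0, hw0, hr⟩)
    · left; simp only [Finset.coe_union]; exact Set.mem_union_left _ hx
    · exact step_R_aux M V W N w hw hWV hN hr hw0
  · rintro x (hx | ⟨w', hw', hr⟩)
    · simp only [Finset.coe_union, Set.mem_union, Finset.mem_coe] at hx
      rcases hx with hxV | hxN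
      · left; exact hxV
      · right
        rcases (hN x).mp hxN with ⟨hn, hok, hnv⟩
        exact ⟨w, hw, Rch.step (Rch.refl _) hn hok hnv⟩
    · have hr0 : Rch M V w' x := Rch_mono M Finset.subset_union_left hr
      rcases Finset.mem_union.mp hw' with hw'' | hw''
      · right; exact ⟨w', Finset.mem_of_mem_erase hw'', hr0⟩
      · right
        rcases (hN w').mp hw'' with ⟨hn, hok, hnv⟩
        exact ⟨w, hw, Rch_trans M (Rch.step (Rch.refl _) hn hok hnv) hr0⟩

lemma RS_empty (M : List (List Int)) (V : Finset (Int × Int)) :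
    RS M V ∅ = ∅ := by
  simp [RS]

-- ---- inner neighbour-loop lemma and BFS loop lemma (A side) ----

lemma newsV_eq (M : List (List Int)) (V : Finset (Int × Int)) (ns : List (Int × Int))
    (x : Int × Int) : x ∈ newsV M V ns ↔ x ∈ ns ∧ okC M x ∧ x ∉ V := by
  simp [newsV, okC, List.mem_filter]

lemma innerA_spec (M : List (List Int)) (w : Int × Int) :
    ∀ (os : List (Int × Int)) (v : List (List Int)) (q : List (Int × Int)) (c : Int),
      (os.map (fun o => (w.1 + o.1, w.2 + o.2))).Nodup → shapeV M v →
      shapeV M (os.foldl (bfsStepA M M.length M.headI.length w) (v, q, c)).1 ∧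
      (os.foldl (bfsStepA M M.length M.headI.length w) (v, q, c)).2.1
        = q ++ newsV M (VA M v) (os.map (fun o => (w.1 + o.1, w.2 + o.2))) ∧
      (os.foldl (bfsStepA M M.length M.headI.length w) (v, q, c)).2.2
        = c + (newsV M (VA M v) (os.map (fun o => (w.1 + o.1, w.2 + o.2)))).length ∧
      VA M (os.foldl (bfsStepA M M.length M.headI.length w) (v, q, c)).1
        = VA M v ∪ (newsV M (VA M v) (os.map (fun o => (w.1 + o.1, w.2 + o.2)))).toFinset := by
  intro os
  induction os with
  | nil => intro v q c _ hs; simp [newsV, hs]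
  | cons o os ih =>
    intro v q c hnd hs
    simp only [List.map_cons, List.nodup_cons] at hnd
    obtain ⟨hx_notin, hnd'⟩ := hnd
    simp only [List.foldl_cons, List.map_cons]
    set x : Int × Int := (w.1 + o.1, w.2 + o.2) with hxdef
    by_cases hC : okC M x ∧ x ∉ VA M v
    · -- the neighbour is taken
      have hok := hC.1
      have hbounds := (okC_iff M x).mp hok
      have hx_cells : x ∈ cellsF M := okC_mem_cellsF M x hok
      have hvis : pvVis v x.1 x.2 = 0 := (not_mem_VA_iff M v x hx_cells).mp hC.2
      have hcond : 0 ≤ w.1 + o.1 ∧ 0 ≤ w.2 + o.2 ∧ w.1 + o.1 < (M.length : Int) ∧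
          w.2 + o.2 < (M.headI.length : Int) ∧ pvGrid M (w.1 + o.1) (w.2 + o.2) ≠ 0 ∧
          pvVis v (w.1 + o.1) (w.2 + o.2) = 0 := by
        simp only [← hxdef] at *
        exact ⟨hbounds.1, hbounds.2.2.1, hbounds.2.1, hbounds.2.2.2.1, hbounds.2.2.2.2, hvis⟩
      have hstep : bfsStepA M M.length M.headI.length w (v, q, c) o
          = (pvMark v x.1 x.2, q ++ [x], c + 1) := by
        simp only [bfsStepA]
        rw [if_pos hcond]
      rw [hstep]
      have hs1 : shapeV M (pvMark v x.1 x.2) := shapeV_mark M v x.1 x.2 hs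
      have hVA1 : VA M (pvMark v x.1 x.2) = insert x (VA M v) := VA_mark M v x hs hx_cells
      obtain ⟨ih1, ih2, ih3, ih4⟩ := ih (pvMark v x.1 x.2) (q ++ [x]) (c + 1) hnd' hs1
      -- the tail's news are the same w.r.t. the old and the new visited set
      have hnews_tail : newsV M (VA M (pvMark v x.1 x.2)) (os.map (fun o => (w.1 + o.1, w.2 + o.2)))
          = newsV M (VA M v) (os.map (fun o => (w.1 + o.1, w.2 + o.2))) := by
        unfold newsV
        apply List.filter_congr
        intro y hy
        have hyx : y ≠ x := fun h => hx_notin (h ▸ hy)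
        rw [hVA1]
        simp [Finset.mem_insert, hyx]
      have hnews_cons : newsV M (VA M v) (x :: os.map (fun o => (w.1 + o.1, w.2 + o.2)))
          = x :: newsV M (VA M v) (os.map (fun o => (w.1 + o.1, w.2 + o.2))) := by
        unfold newsV
        rw [List.filter_cons_of_pos (by
          rw [Bool.and_eq_true]
          exact ⟨hok, decide_eq_true hC.2⟩)]
      rw [hnews_cons]
      refine ⟨ih1, ?_, ?_, ?_⟩
      · rw [ih2, hnews_tail, List.append_assoc]; rfl
      · rw [ih3, hnews_tail]; push_cast [List.length_cons]; ring
      · rw [ih4, hnews_tail, hVA1]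
        ext z
        simp only [Finset.mem_union, Finset.mem_insert, List.toFinset_cons,
          List.mem_toFinset, Finset.mem_insert]
        tauto
    · -- the neighbour is skipped
      have hcond_false : ¬(0 ≤ w.1 + o.1 ∧ 0 ≤ w.2 + o.2 ∧ w.1 + o.1 < (M.length : Int) ∧
          w.2 + o.2 < (M.headI.length : Int) ∧ pvGrid M (w.1 + o.1) (w.2 + o.2) ≠ 0 ∧
          pvVis v (w.1 + o.1) (w.2 + o.2) = 0) := by
        intro h
        apply hC
        have hok : okC M x := by
          rw [okC_iff]
          exact ⟨h.1, h.2.2.1, h.2.1, h.2.2.2.1, h.2.2.2.2.1⟩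
        refine ⟨hok, ?_⟩
        rw [not_mem_VA_iff M v x (okC_mem_cellsF M x hok)]
        exact h.2.2.2.2.2
      have hstep : bfsStepA M M.length M.headI.length w (v, q, c) o = (v, q, c) := by
        simp only [bfsStepA]
        rw [if_neg hcond_false]
      rw [hstep]
      have hnews_cons : newsV M (VA M v) (x :: os.map (fun o => (w.1 + o.1, w.2 + o.2)))
          = newsV M (VA M v) (os.map (fun o => (w.1 + o.1, w.2 + o.2))) := by
        unfold newsV
        rw [List.filter_cons_of_neg]
        simp only [Bool.and_eq_true, decide_eq_true_eq, not_and]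
        intro hokB hdec
        exact absurd ⟨hokB, hdec⟩ hC
      rw [hnews_cons]
      exact ih v q c hnd' hs

lemma bfsA_spec (M : List (List Int)) :
    ∀ (fuel : Nat) (q : List (Int × Int)) (v : List (List Int)) (c : Int),
      shapeV M v → q.Nodup → (∀ x ∈ q, x ∈ VA M v ∧ okC M x) →
      (cellsF M).card + q.length ≤ fuel + (VA M v).card →
      shapeV M (bfsA M M.length M.headI.length fuel q v c).1 ∧
      (↑(VA M (bfsA M M.length M.headI.length fuel q v c).1) : Set (Int × Int))
        = ↑(VA M v) ∪ RS M (VA M v) q.toFinset ∧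
      (bfsA M M.length M.headI.length fuel q v c).2
        = c + ((VA M (bfsA M M.length M.headI.length fuel q v c).1).card : Int)
            - ((VA M v).card : Int) := by
  intro fuel
  induction fuel with
  | zero =>
    intro q v c hs hnd hmem hfuel
    have hcard := Finset.card_filter_le (cellsF M) (fun p => pvVis v p.1 p.2 ≠ 0)
    have hq : q = [] := by
      cases q with
      | nil => rfl
      | cons a t => exfalso; simp only [List.length_cons] at hfuel
                    have : (VA M v).card ≤ (cellsF M).card := Finset.card_filter_le _ _
                    omega
    subst hq
    refine ⟨by simpa [bfsA] using hs, by simp [bfsA, RS_empty], by simp [bfsA]⟩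
  | succ fuel ih =>
    intro q v c hs hnd hmem hfuel
    cases q with
    | nil => refine ⟨by simpa [bfsA] using hs, by simp [bfsA, RS_empty], by simp [bfsA]⟩
    | cons w t =>
      have hw_mem := hmem w (List.mem_cons_self)
      simp only [bfsA]
      obtain ⟨hsh1, hq1, hc1, hVA1⟩ :=
        innerA_spec M w offsA v t c (nbrs_nodup w) hs
      set st := offsA.foldl (bfsStepA M M.length M.headI.length w) (v, t, c) with hstdef
      set lN := newsV M (VA M v) (offsA.map (fun o => (w.1 + o.1, w.2 + o.2))) with hlNdef
      have hlN_mem : ∀ x, x ∈ lN ↔ x ∈ nbrs w ∧ okC M x ∧ x ∉ VA M v := by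
        intro x; exact newsV_eq M (VA M v) _ x
      have hlN_nd : lN.Nodup := List.Nodup.filter _ (nbrs_nodup w)
      have hlN_card : (VA M st.1).card = (VA M v).card + lN.length := by
        rw [hVA1, Finset.card_union_of_disjoint, List.toFinset_card_of_nodup hlN_nd]
        rw [Finset.disjoint_right]
        intro a ha
        rw [List.mem_toFinset, hlN_mem] at ha
        exact ha.2.2
      simp only [List.nodup_cons] at hnd
      obtain ⟨hwt, hndt⟩ := hnd
      have hnd' : (t ++ lN).Nodup := by
        rw [List.nodup_append]
        refine ⟨hndt, hlN_nd, ?_⟩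
        intro a ha b hb
        rintro rfl
        exact ((hlN_mem a).mp hb).2.2 (hmem a (List.mem_cons_of_mem _ ha)).1
      have hmem' : ∀ x ∈ t ++ lN, x ∈ VA M st.1 ∧ okC M x := by
        intro x hx
        rcases List.mem_append.mp hx with hx | hx
        · have := hmem x (List.mem_cons_of_mem _ hx)
          exact ⟨by rw [hVA1]; exact Finset.mem_union_left _ this.1, this.2⟩
        · have := (hlN_mem x).mp hx
          exact ⟨by rw [hVA1]; exact Finset.mem_union_right _ (List.mem_toFinset.mpr hx),
            this.2.1⟩
      have hfuel' : (cellsF M).card + (t ++ lN).length ≤ fuel + (VA M st.1).card := by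
        rw [List.length_append, hlN_card]
        simp only [List.length_cons] at hfuel
        omega
      rw [hq1, hc1]
      obtain ⟨ihs, ihset, ihc⟩ := ih (t ++ lN) st.1 (c + (lN.length : Int)) hsh1 hnd' hmem' hfuel'
      refine ⟨ihs, ?_, ?_⟩
      · rw [ihset]
        have hstep := step_R M (VA M v) ((w :: t).toFinset) (lN.toFinset) w
          (by simp) (by intro x hx; simp only [List.mem_toFinset] at hx; exact (hmem x hx).1)
          (by intro x; rw [List.mem_toFinset]; exact hlN_mem x)
        rw [hstep]
        congr 1
        · rw [← hVA1]
        · rw [← hVA1]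
          congr 1
          rw [List.toFinset_cons, Finset.erase_insert (by
            rw [List.mem_toFinset]; exact hwt), List.toFinset_append]
      · rw [ihc, hlN_card]
        push_cast
        ring

lemma pvVis_zero_init (M : List (List Int)) (x y : Int) :
    pvVis (List.replicate M.length (List.replicate M.headI.length (0 : Int))) x y = 0 := by
  unfold pvVis
  by_cases h : x.toNat < M.length
  · have houter : (List.replicate M.length (List.replicate M.headI.length (0 : Int))).getD
        x.toNat [] = List.replicate M.headI.length (0 : Int) := by
      rw [List.getD_eq_getElem?_getD, List.getElem?_replicate_of_lt h, Option.getD_some]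
    rw [houter]
    by_cases h2 : y.toNat < M.headI.length
    · rw [List.getD_eq_getElem?_getD, List.getElem?_replicate_of_lt h2, Option.getD_some]
    · rw [List.getD_eq_getElem?_getD, List.getElem?_eq_none (by simpa using h2)]
      rfl
  · have houter : (List.replicate M.length (List.replicate M.headI.length (0 : Int))).getD
        x.toNat [] = [] := by
      rw [List.getD_eq_getElem?_getD, List.getElem?_eq_none (by simpa using h)]
      rfl
    rw [houter]
    rfl

-- ---- components, symmetry, and the common characterisation ----

def compSet (M : List (List Int)) (p : Int × Int) : Set (Int × Int) :=
  {q | Rch M ∅ p q}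

lemma offsA_neg : ∀ o ∈ offsA, ((-o.1, -o.2) : Int × Int) ∈ offsA := by decide

lemma nbrs_symm {x y : Int × Int} (h : x ∈ nbrs y) : y ∈ nbrs x := by
  simp only [nbrs, List.mem_map] at h ⊢
  obtain ⟨o, ho, hx⟩ := h
  refine ⟨(-o.1, -o.2), offsA_neg o ho, ?_⟩
  rw [← hx]
  exact Prod.ext (by simp) (by simp)

lemma Rch_ok (M : List (List Int)) {x y : Int × Int} (hx : okC M x)
    (h : Rch M ∅ x y) : okC M y := by
  induction h with
  | refl => exact hx
  | step _ _ hok _ _ => exact hok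

lemma Rch_symm (M : List (List Int)) {x y : Int × Int} (hx : okC M x)
    (h : Rch M ∅ x y) : Rch M ∅ y x := by
  induction h with
  | refl => exact Rch.refl _
  | @step a b hpre hn hok _ ih =>
    have hb : okC M a := Rch_ok M hx hpre
    exact Rch_trans M (Rch.step (Rch.refl b) (nbrs_symm hn) hb (by simp)) ih

lemma comp_congr (M : List (List Int)) {c p : Int × Int} (hc : okC M c)
    (h : Rch M ∅ c p) : compSet M c = compSet M p := by
  ext q
  simp only [compSet, Set.mem_setOf_eq]
  exact ⟨fun hq => Rch_trans M (Rch_symm M hc h) hq, fun hq => Rch_trans M h hq⟩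

lemma comp_subset (M : List (List Int)) {p : Int × Int} (hp : okC M p) :
    compSet M p ⊆ (↑(cellsF M) : Set (Int × Int)) := by
  intro q hq
  exact okC_mem_cellsF M q (Rch_ok M hp hq)

lemma comp_finite (M : List (List Int)) {p : Int × Int} (hp : okC M p) :
    (compSet M p).Finite :=
  Set.Finite.subset (cellsF M).finite_toSet (comp_subset M hp)

-- the component size
noncomputable def Scomp (M : List (List Int)) (p : Int × Int) : ℕ :=
  (compSet M p).ncard

lemma Scomp_pos (M : List (List Int)) {p : Int × Int} (hp : okC M p) :
    0 < Scomp M p := by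
  rw [Scomp, Set.ncard_pos (comp_finite M hp)]
  exact ⟨p, Rch.refl p⟩

-- "v is the maximal component size": the common characterisation of both outputs
def CharMax (M : List (List Int)) (v : Int) : Prop :=
  (∀ p, okC M p → ((Scomp M p : Int) ≤ v)) ∧
  (v = 0 ∨ ∃ p, okC M p ∧ (Scomp M p : Int) = v)

lemma CharMax_unique (M : List (List Int)) {v w : Int}
    (hv : CharMax M v) (hw : CharMax M w) : v = w := by
  obtain ⟨hb1, ha1⟩ := hv
  obtain ⟨hb2, ha2⟩ := hw
  rcases ha1 with rfl | ⟨p, hp, hv⟩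
  · rcases ha2 with rfl | ⟨p, hp, hw⟩
    · rfl
    · have := hb1 p hp
      have := Scomp_pos M hp
      omega
  · rcases ha2 with rfl | ⟨q, hq, hw⟩
    · have := hb2 p hp
      have := Scomp_pos M hp
      omega
    · have := hb1 q hq
      have := hb2 p hp
      omega

-- closed sets of cells (unions of complete components)
def ClosedS (M : List (List Int)) (V : Set (Int × Int)) : Prop :=
  (∀ x ∈ V, okC M x) ∧ ∀ x ∈ V, ∀ z ∈ nbrs x, okC M z → z ∈ V

lemma ClosedS_Rch (M : List (List Int)) {V : Set (Int × Int)} (hV : ClosedS M V)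
    {q p : Int × Int} (hq : q ∈ V) (h : Rch M ∅ q p) : p ∈ V := by
  induction h with
  | refl => exact hq
  | step _ hn hok _ ih => exact hV.2 _ ih _ hn hok

lemma comp_disj (M : List (List Int)) {V : Set (Int × Int)} (hV : ClosedS M V)
    {p : Int × Int} (hp : okC M p) (hpV : p ∉ V) :
    Disjoint (compSet M p) V := by
  rw [Set.disjoint_left]
  intro q hq hqV
  exact hpV (ClosedS_Rch M hV hqV (Rch_symm M hp hq))

-- reaching from p avoiding (insert p V) still covers all of p's component, for closed V
lemma comp_eq_insert (M : List (List Int)) (V : Finset (Int × Int))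
    (hV : ClosedS M (↑V)) {p : Int × Int} (hp : okC M p) (hpV : p ∉ V) :
    compSet M p = {p} ∪ {q | Rch M (insert p V) p q} := by
  ext q
  simp only [compSet, Set.mem_setOf_eq, Set.mem_union, Set.mem_singleton_iff]
  constructor
  · intro h
    induction h with
    | refl => left; rfl
    | @step a b hpre hn hok hnv ih =>
      by_cases hbp : b = p
      · left; exact hbp
      · right
        have hbV : b ∉ V := by
          intro hbV
          have ha_ok : okC M a := Rch_ok M hp hpre
          have haV : a ∈ (↑V : Set (Int × Int)) :=
            hV.2 b (Finset.mem_coe.mpr hbV) a (nbrs_symm hn) ha_ok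
          rcases ih with heq | hra
          · subst heq; exact hpV (Finset.mem_coe.mp haV)
          · rcases Rch_end M (insert p V) hra with heq | hna
            · subst heq; exact hpV (Finset.mem_coe.mp haV)
            · exact hna (Finset.mem_insert_of_mem (Finset.mem_coe.mp haV))
        have hbpV : b ∉ insert p V := by simp [hbp, hbV]
        rcases ih with heq | hra
        · subst heq; exact Rch.step (Rch.refl _) hn hok hbpV
        · exact Rch.step hra hn hok hbpV
  · rintro (rfl | h)
    · exact Rch.refl q
    · exact Rch_mono M (Finset.empty_subset _) h

-- ===== A SIDE: the scan computes CharMax =====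

def pairsL (m n : Nat) : List (Nat × Nat) :=
  (List.range m).flatMap (fun i => (List.range n).map (Prod.mk i))

lemma mem_pairsL (m n : Nat) (p : Nat × Nat) : p ∈ pairsL m n ↔ p.1 < m ∧ p.2 < n := by
  cases p with
  | mk i j => simp [pairsL, List.mem_flatMap]

lemma foldl_nested_eq_pairs {σ : Type} (f : σ → Nat → Nat → σ) (m n : Nat) (init : σ) :
    (List.range m).foldl (fun st i => (List.range n).foldl (fun st j => f st i j) st) init
      = (pairsL m n).foldl (fun st p => f st p.1 p.2) init := by
  rw [pairsL, List.foldl_flatMap]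
  congr 1
  funext st i
  rw [List.foldl_map]

def USet (M : List (List Int)) (P : List (Nat × Nat)) : Set (Int × Int) :=
  {q | ∃ p ∈ P, okC M ((p.1 : Int), (p.2 : Int)) ∧ Rch M ∅ ((p.1 : Int), (p.2 : Int)) q}

lemma USet_closed (M : List (List Int)) (P : List (Nat × Nat)) : ClosedS M (USet M P) := by
  constructor
  · rintro x ⟨p, _, hok, hr⟩
    exact Rch_ok M hok hr
  · rintro x ⟨p, hp, hok, hr⟩ z hz hokz
    exact ⟨p, hp, hok, Rch.step hr hz hokz (by simp)⟩

def AInv (M : List (List Int)) (P : List (Nat × Nat)) (st : List (List Int) × Int) : Prop :=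
  shapeV M st.1 ∧ (↑(VA M st.1) : Set (Int × Int)) = USet M P ∧
  (∀ p ∈ P, okC M ((p.1 : Int), (p.2 : Int)) → ((Scomp M ((p.1 : Int), (p.2 : Int)) : Int) ≤ st.2)) ∧
  (st.2 = 0 ∨ ∃ c : Int × Int, okC M c ∧ (Scomp M c : Int) = st.2) ∧ 0 ≤ st.2

lemma visitA_step (M : List (List Int)) (P : List (Nat × Nat)) (st : List (List Int) × Int)
    (i j : Nat) (hi : i < M.length) (hj : j < M.headI.length)
    (h : AInv M P st) : AInv M (P ++ [(i, j)]) (visitA M st i j) := by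
  obtain ⟨hsh, hU, hbd, hat, hnn⟩ := h
  set p : Int × Int := ((i : Int), (j : Int)) with hpdef
  have hp_cells : p ∈ cellsF M := by
    rw [mem_cellsF]
    refine ⟨?_, ?_, ?_, ?_⟩ <;> simp [hpdef] <;> omega
  have hUc : ClosedS M (USet M P) := USet_closed M P
  have hVAc : ClosedS M (↑(VA M st.1) : Set (Int × Int)) := by rw [hU]; exact hUc
  by_cases hg : pvGrid M (i : Int) (j : Int) ≠ 0 ∧ pvVis st.1 (i : Int) (j : Int) = 0
  · -- a fresh 1-cell: A floods its whole component
    set v1 : List (List Int) := pvMark st.1 (i : Int) (j : Int) with hv1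
    set rr := bfsA M M.length M.headI.length (M.length * M.headI.length + 1)
        [((i : Int), (j : Int))] v1 1 with hrrdef
    have hbody : visitA M st i j = (rr.1, max st.2 rr.2) := by
      simp only [visitA]
      rw [if_pos hg]
    rw [hbody]
    have hok : okC M p := by
      rw [okC_iff]
      refine ⟨?_, ?_, ?_, ?_, hg.1⟩ <;> simp [hpdef] <;> omega
    have hpV : p ∉ VA M st.1 := (not_mem_VA_iff M st.1 p hp_cells).mpr hg.2
    have hpU : p ∉ USet M P := by
      rw [← hU]
      simpa using hpV
    have hVA1 : VA M v1 = insert p (VA M st.1) := VA_mark M st.1 p hsh hp_cells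
    obtain ⟨rsh, rset, rc⟩ := bfsA_spec M (M.length * M.headI.length + 1) [p] v1 1
      (shapeV_mark M st.1 _ _ hsh) (List.nodup_singleton p)
      (by
        intro x hx
        rw [List.mem_singleton] at hx
        subst hx
        exact ⟨hVA1 ▸ Finset.mem_insert_self p _, hok⟩)
      (by
        have := card_cellsF_le M
        simp only [List.length_singleton]
        omega)
    have hRS : RS M (VA M v1) ([p].toFinset) = {q | Rch M (VA M v1) p q} := by
      ext z
      simp [RS]
    have hcomp : compSet M p = {p} ∪ {q | Rch M (insert p (VA M st.1)) p q} :=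
      comp_eq_insert M (VA M st.1) hVAc hok hpV
    have hset2 : (↑(VA M rr.1) : Set (Int × Int)) = USet M P ∪ compSet M p := by
      rw [rset, hRS, hVA1, Finset.coe_insert, hU, hcomp]
      ext z
      simp only [Set.mem_union, Set.mem_insert_iff, Set.mem_setOf_eq, Set.mem_singleton_iff]
      tauto
    -- cardinalities: the flood's count is exactly the component size
    have hfinU : (USet M P).Finite := by
      rw [← hU]
      exact (VA M st.1).finite_toSet
    have hdisj : Disjoint (USet M P) (compSet M p) := (comp_disj M hUc hok hpU).symm
    have hcard1 : (VA M v1).card = (VA M st.1).card + 1 := by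
      rw [hVA1, Finset.card_insert_of_notMem hpV]
    have hcardr : ((VA M rr.1).card : Int) = ((VA M st.1).card : Int) + (Scomp M p : Int) := by
      have h1 : ((VA M rr.1) : Set (Int × Int)).ncard = (VA M rr.1).card :=
        Set.ncard_coe_finset _
      have h2 : ((VA M st.1) : Set (Int × Int)).ncard = (VA M st.1).card :=
        Set.ncard_coe_finset _
      have h3 : (USet M P ∪ compSet M p).ncard = (USet M P).ncard + (compSet M p).ncard :=
        Set.ncard_union_eq hdisj hfinU (comp_finite M hok)
      have h4 : (USet M P).ncard = ((VA M st.1) : Set (Int × Int)).ncard := by rw [hU]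
      rw [← h1, hset2, h3, h4, h2, Scomp]
      push_cast
      ring
    have hr2 : rr.2 = (Scomp M p : Int) := by
      rw [rc, hcard1]
      push_cast
      rw [hcardr]
      ring
    have hUapp : USet M (P ++ [(i, j)]) = USet M P ∪ compSet M p := by
      ext z
      simp only [USet, Set.mem_setOf_eq, List.mem_append, List.mem_singleton, Set.mem_union,
        compSet]
      constructor
      · rintro ⟨p', hp' | rfl, hok', hr'⟩
        · exact Or.inl ⟨p', hp', hok', hr'⟩
        · exact Or.inr hr'
      · rintro (⟨p', hp', hok', hr'⟩ | hr')
        · exact ⟨p', Or.inl hp', hok', hr'⟩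
        · exact ⟨(i, j), Or.inr rfl, hok, hr'⟩
    refine ⟨rsh, by rw [hUapp, hset2], ?_, ?_, ?_⟩
    · intro p' hp' hok'
      rcases List.mem_append.mp hp' with hp'' | hp''
      · exact le_trans (hbd p' hp'' hok') (le_max_left _ _)
      · rw [List.mem_singleton] at hp''
        subst hp''
        rw [← hr2]
        exact le_max_right _ _
    · rcases le_total st.2 rr.2 with hle | hle
      · rw [max_eq_right hle]
        exact Or.inr ⟨p, hok, hr2.symm⟩
      · rw [max_eq_left hle]
        exact hat
    · exact le_trans hnn (le_max_left _ _)
  · -- already visited or a 0-cell: nothing changes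
    have hbody : visitA M st i j = (st.1, max st.2 0) := by
      simp only [visitA]
      rw [if_neg hg]
    rw [hbody]
    have hmax : max st.2 0 = st.2 := max_eq_left hnn
    have hUsub : ∀ hok : okC M p, ∃ c0 ∈ P, okC M ((c0.1 : Int), (c0.2 : Int)) ∧
        Rch M ∅ ((c0.1 : Int), (c0.2 : Int)) p := by
      intro hok
      have hgrid : pvGrid M (i : Int) (j : Int) ≠ 0 := by
        rw [okC_iff] at hok
        exact hok.2.2.2.2
      have hvis : pvVis st.1 (i : Int) (j : Int) ≠ 0 := by
        intro hv
        exact hg ⟨hgrid, hv⟩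
      have hpVA : p ∈ VA M st.1 := by
        by_contra hc
        exact hvis ((not_mem_VA_iff M st.1 p hp_cells).mp hc)
      have : p ∈ USet M P := by
        rw [← hU]
        simpa using hpVA
      exact this
    refine ⟨hsh, ?_, ?_, ?_, ?_⟩
    · rw [hU]
      ext z
      simp only [USet, Set.mem_setOf_eq, List.mem_append, List.mem_singleton]
      constructor
      · rintro ⟨p', hp', hok', hr'⟩
        exact ⟨p', Or.inl hp', hok', hr'⟩
      · rintro ⟨p', hp' | rfl, hok', hr'⟩
        · exact ⟨p', hp', hok', hr'⟩
        · obtain ⟨c0, hc0, hokc0, hrc0⟩ := hUsub hok'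
          exact ⟨c0, hc0, hokc0, Rch_trans M hrc0 hr'⟩
    · intro p' hp' hok'
      rw [hmax]
      rcases List.mem_append.mp hp' with hp'' | hp''
      · exact hbd p' hp'' hok'
      · rw [List.mem_singleton] at hp''
        subst hp''
        obtain ⟨c0, hc0, hokc0, hrc0⟩ := hUsub hok'
        have hcomp_eq : compSet M ((c0.1 : Int), (c0.2 : Int)) = compSet M p :=
          comp_congr M hokc0 hrc0
        have hSeq : Scomp M ((c0.1 : Int), (c0.2 : Int)) = Scomp M p := by
          rw [Scomp, Scomp, hcomp_eq]
        calc (Scomp M p : Int)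
            = (Scomp M ((c0.1 : Int), (c0.2 : Int)) : Int) := by rw [hSeq]
          _ ≤ st.2 := hbd c0 hc0 hokc0
    · rw [hmax]; exact hat
    · rw [hmax]; exact hnn

lemma A_char (M : List (List Int)) : CharMax M (max_one_area M) := by
  have hrw : max_one_area M = ((pairsL M.length M.headI.length).foldl
      (fun st p => visitA M st p.1 p.2)
      (List.replicate M.length (List.replicate M.headI.length (0 : Int)), 0)).2 :=
    congrArg Prod.snd (foldl_nested_eq_pairs (fun st i j => visitA M st i j)
      M.length M.headI.length
      (List.replicate M.length (List.replicate M.headI.length (0 : Int)), 0))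
  have hfold : ∀ (P : List (Nat × Nat)),
      (∀ p ∈ P, p.1 < M.length ∧ p.2 < M.headI.length) →
      ∀ (P0 : List (Nat × Nat)) (st : List (List Int) × Int), AInv M P0 st →
      AInv M (P0 ++ P) (P.foldl (fun st p => visitA M st p.1 p.2) st) := by
    intro P
    induction P with
    | nil =>
      intro _ P0 st h
      simpa using h
    | cons p P ihp =>
      intro hb P0 st h
      simp only [List.foldl_cons]
      have h1 := visitA_step M P0 st p.1 p.2 (hb p List.mem_cons_self).1
        (hb p List.mem_cons_self).2 h
      have h2 := ihp (fun q hq => hb q (List.mem_cons_of_mem _ hq)) (P0 ++ [(p.1, p.2)])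
        (visitA M st p.1 p.2) h1
      rw [List.append_assoc, List.singleton_append, Prod.mk.eta] at h2
      exact h2
  have hinv0 : AInv M []
      (List.replicate M.length (List.replicate M.headI.length (0 : Int)), 0) := by
    refine ⟨⟨by simp, ?_⟩, ?_, by simp, Or.inl rfl, le_refl 0⟩
    · intro r hr
      rw [List.eq_of_mem_replicate hr]
      simp
    · ext z
      simp only [USet, Set.mem_setOf_eq, List.not_mem_nil, false_and, exists_false,
        Finset.mem_coe, iff_false]
      intro hz
      rw [VA, Finset.mem_filter] at hz
      exact hz.2 (pvVis_zero_init M z.1 z.2)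
  obtain ⟨_, _, hbd, hat, _⟩ := hfold (pairsL M.length M.headI.length)
    (fun p hp => (mem_pairsL _ _ p).mp hp) []
    (List.replicate M.length (List.replicate M.headI.length (0 : Int)), 0) hinv0
  rw [hrw]
  constructor
  · intro p hp
    have hb := (okC_iff M p).mp hp
    have hmem : ((p.1.toNat, p.2.toNat) : Nat × Nat) ∈ pairsL M.length M.headI.length := by
      rw [mem_pairsL]
      constructor <;> simp <;> omega
    have hcast : ((((p.1.toNat, p.2.toNat) : Nat × Nat).1 : Int),
        (((p.1.toNat, p.2.toNat) : Nat × Nat).2 : Int)) = p := by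
      refine Prod.ext ?_ ?_ <;> simp <;> omega
    have hB := hbd ((p.1.toNat, p.2.toNat) : Nat × Nat) (by simpa using hmem)
      (by rw [hcast]; exact hp)
    rwa [hcast] at hB
  · exact hat

-- ===== B SIDE: disjoint-set labeling computes CharMax =====

-- the full adjacency relation on ok cells
def EFull (M : List (List Int)) (x y : Int × Int) : Prop :=
  okC M x ∧ okC M y ∧ x ∈ nbrs y

-- equivalence closure of EFull = mutual reachability, on ok cells
lemma eqvgen_full_cases (M : List (List Int)) {x y : Int × Int}
    (h : Relation.EqvGen (EFull M) x y) :
    x = y ∨ (okC M x ∧ okC M y ∧ Rch M ∅ x y) := by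
  induction h with
  | rel a b hab =>
    right
    exact ⟨hab.1, hab.2.1, Rch.step (Rch.refl a) (nbrs_symm hab.2.2) hab.2.1 (by simp)⟩
  | refl a => left; rfl
  | symm a b _ ih =>
    rcases ih with rfl | ⟨h1, h2, h3⟩
    · left; rfl
    · right; exact ⟨h2, h1, Rch_symm M h1 h3⟩
  | trans a b c _ _ ih1 ih2 =>
    rcases ih1 with rfl | ⟨h1, h2, h3⟩
    · exact ih2
    · rcases ih2 with rfl | ⟨g1, g2, g3⟩
      · right; exact ⟨h1, h2, h3⟩
      · right; exact ⟨h1, g2, Rch_trans M h3 g3⟩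

lemma eqvgen_iff_Rch (M : List (List Int)) {x y : Int × Int} (hx : okC M x) :
    Relation.EqvGen (EFull M) x y ↔ Rch M ∅ x y := by
  constructor
  · intro h
    rcases eqvgen_full_cases M h with rfl | ⟨_, _, h3⟩
    · exact Rch.refl x
    · exact h3
  · intro h
    induction h with
    | refl => exact Relation.EqvGen.refl _
    | @step a b hpre hn hok hnv ih =>
      exact Relation.EqvGen.trans _ _ _ ih
        (Relation.EqvGen.symm _ _
          (Relation.EqvGen.rel _ _ ⟨hok, Rch_ok M hx hpre, hn⟩))

-- extending a relation by one pair (u, v)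
lemma eqvgen_extend {α : Type} (E : α → α → Prop) (u v : α) (a b : α) :
    Relation.EqvGen (fun x y => E x y ∨ (x = u ∧ y = v)) a b ↔
      Relation.EqvGen E a b ∨ (Relation.EqvGen E a u ∧ Relation.EqvGen E v b) ∨
        (Relation.EqvGen E a v ∧ Relation.EqvGen E u b) := by
  constructor
  · intro h
    induction h with
    | rel x y hxy =>
      rcases hxy with h | ⟨rfl, rfl⟩
      · exact Or.inl (Relation.EqvGen.rel _ _ h)
      · exact Or.inr (Or.inl ⟨Relation.EqvGen.refl _, Relation.EqvGen.refl _⟩)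
    | refl x => exact Or.inl (Relation.EqvGen.refl _)
    | symm x y _ ih =>
      rcases ih with h | ⟨h1, h2⟩ | ⟨h1, h2⟩
      · exact Or.inl (Relation.EqvGen.symm _ _ h)
      · exact Or.inr (Or.inr ⟨Relation.EqvGen.symm _ _ h2, Relation.EqvGen.symm _ _ h1⟩)
      · exact Or.inr (Or.inl ⟨Relation.EqvGen.symm _ _ h2, Relation.EqvGen.symm _ _ h1⟩)
    | trans x y z _ _ ih1 ih2 =>
      rcases ih1 with h | ⟨h1, h2⟩ | ⟨h1, h2⟩ <;>
        rcases ih2 with g | ⟨g1, g2⟩ | ⟨g1, g2⟩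
      · exact Or.inl (Relation.EqvGen.trans _ _ _ h g)
      · exact Or.inr (Or.inl ⟨Relation.EqvGen.trans _ _ _ h g1, g2⟩)
      · exact Or.inr (Or.inr ⟨Relation.EqvGen.trans _ _ _ h g1, g2⟩)
      · exact Or.inr (Or.inl ⟨h1, Relation.EqvGen.trans _ _ _ h2 g⟩)
      · exact Or.inr (Or.inl ⟨h1, g2⟩)
      · exact Or.inl (Relation.EqvGen.trans _ _ _ h1 g2)
      · exact Or.inr (Or.inr ⟨h1, Relation.EqvGen.trans _ _ _ h2 g⟩)
      · exact Or.inl (Relation.EqvGen.trans _ _ _ h1 g2)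
      · exact Or.inr (Or.inr ⟨h1, g2⟩)
  · intro h
    have base : ∀ {a' b' : α}, Relation.EqvGen E a' b' →
        Relation.EqvGen (fun x y => E x y ∨ (x = u ∧ y = v)) a' b' :=
      fun h' => Relation.EqvGen.mono (fun x y hxy => Or.inl hxy) h'
    have huv : Relation.EqvGen (fun x y => E x y ∨ (x = u ∧ y = v)) u v :=
      Relation.EqvGen.rel _ _ (Or.inr ⟨rfl, rfl⟩)
    rcases h with h | ⟨h1, h2⟩ | ⟨h1, h2⟩
    · exact base h
    · exact Relation.EqvGen.trans _ _ _ (Relation.EqvGen.trans _ _ _ (base h1) huv) (base h2)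
    · exact Relation.EqvGen.trans _ _ _
        (Relation.EqvGen.trans _ _ _ (base h1) (Relation.EqvGen.symm _ _ huv)) (base h2)

lemma eqvgen_congr {α : Type} {E E' : α → α → Prop}
    (h : ∀ x y, E x y ↔ E' x y) {a b : α} :
    Relation.EqvGen E a b ↔ Relation.EqvGen E' a b :=
  ⟨Relation.EqvGen.mono (fun x y hxy => (h x y).mp hxy),
   Relation.EqvGen.mono (fun x y hxy => (h x y).mpr hxy)⟩

lemma eqvgen_bot {α : Type} {a b : α} :
    Relation.EqvGen (fun _ _ => False) a b ↔ a = b := by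
  constructor
  · intro h
    induction h with
    | rel x y hxy => exact absurd hxy (by simp)
    | refl x => rfl
    | symm x y _ ih => exact ih.symm
    | trans x y z _ _ ih1 ih2 => exact ih1.trans ih2
  · rintro rfl; exact Relation.EqvGen.refl _

lemma mem_nbrs_iff (c x : Int × Int) :
    x ∈ nbrs c ↔ ∃ o ∈ offsA, x = (c.1 + o.1, c.2 + o.2) := by
  simp [nbrs, List.mem_map, eq_comm]

-- the representative of c's class
def rootL (lab : PySem.Dict (Int × Int) (Int × Int)) (c : Int × Int) : Int × Int :=
  lab.getD c c

-- the invariant of B's union pass: keys = ok cells, same label ↔ joined by processed edges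
def BInv (M : List (List Int)) (E : (Int × Int) → (Int × Int) → Prop)
    (lab : PySem.Dict (Int × Int) (Int × Int)) : Prop :=
  lab.keys.Nodup ∧ (∀ c, lab.contains c = true ↔ okC M c) ∧
  (∀ x y, okC M x → okC M y → (rootL lab x = rootL lab y ↔ Relation.EqvGen E x y))

lemma BInv_congr (M : List (List Int)) {E E' : (Int × Int) → (Int × Int) → Prop}
    {lab : PySem.Dict (Int × Int) (Int × Int)} (h : BInv M E lab)
    (hE : ∀ x y, E x y ↔ E' x y) : BInv M E' lab :=
  ⟨h.1, h.2.1, fun x y hx hy => (h.2.2 x y hx hy).trans (eqvgen_congr hE)⟩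

lemma get?_mapVal (lab : PySem.Dict (Int × Int) (Int × Int))
    (g : Int × Int → Int × Int) (x : Int × Int) :
    (PySem.Dict.mk (lab.items.map (fun kv => (kv.1, g kv.2)))).get? x
      = (lab.get? x).map g := by
  obtain ⟨l⟩ := lab
  induction l with
  | nil => rfl
  | cons kv rest ih =>
    obtain ⟨k, v⟩ := kv
    simp only [List.map_cons]
    rw [PySem.Dict.get?_mk_cons, PySem.Dict.get?_mk_cons]
    by_cases hk : (k == x) = true
    · rw [if_pos hk, if_pos hk]; rfl
    · rw [if_neg hk, if_neg hk]; exact ih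

lemma mergeStep_spec (M : List (List Int)) (E : (Int × Int) → (Int × Int) → Prop)
    (lab : PySem.Dict (Int × Int) (Int × Int)) (c d : Int × Int)
    (hc : okC M c) (h : BInv M E lab) :
    BInv M (fun x y => E x y ∨ (¬(d.1 = 0 ∧ d.2 = 0) ∧ okC M x ∧
      x = (c.1 + d.1, c.2 + d.2) ∧ y = c)) (mergeStep lab c d) := by
  obtain ⟨hnd, hkeys, hfib⟩ := h
  by_cases hd0 : d.1 = 0 ∧ d.2 = 0
  · rw [mergeStep, if_pos hd0]
    refine ⟨hnd, hkeys, fun x y hx hy => ?_⟩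
    rw [hfib x y hx hy]
    exact eqvgen_congr (fun a b => by tauto)
  · by_cases hcq : lab.contains (c.1 + d.1, c.2 + d.2) = true
    case neg =>
      rw [mergeStep, if_neg hd0, if_neg hcq]
      refine ⟨hnd, hkeys, fun x y hx hy => ?_⟩
      rw [hfib x y hx hy]
      refine eqvgen_congr (fun a b => ?_)
      constructor
      · exact Or.inl
      · rintro (h | ⟨_, hoka, rfl, rfl⟩)
        · exact h
        · exact absurd ((hkeys _).mpr hoka) hcq
    case pos =>
    have hokq : okC M (c.1 + d.1, c.2 + d.2) := (hkeys _).mp hcq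
    -- reduce the target relation to E ⊔ {((q, c))}
    have hE' : ∀ x y, (E x y ∨ (x = (c.1 + d.1, c.2 + d.2) ∧ y = c)) ↔
        (E x y ∨ (¬(d.1 = 0 ∧ d.2 = 0) ∧ okC M x ∧ x = (c.1 + d.1, c.2 + d.2) ∧ y = c)) := by
      intro x y
      constructor
      · rintro (h | ⟨rfl, rfl⟩)
        · exact Or.inl h
        · exact Or.inr ⟨hd0, hokq, rfl, rfl⟩
      · rintro (h | ⟨_, _, rfl, rfl⟩)
        · exact Or.inl h
        · exact Or.inr ⟨rfl, rfl⟩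
    refine BInv_congr M ?_ hE'
    by_cases hrr : lab.getD (c.1 + d.1, c.2 + d.2) (c.1 + d.1, c.2 + d.2) ≠ lab.getD c c
    case neg =>
      rw [mergeStep, if_neg hd0, if_pos hcq, if_neg hrr]
      rw [ne_eq, not_not] at hrr
      refine ⟨hnd, hkeys, fun x y hx hy => ?_⟩
      rw [hfib x y hx hy, eqvgen_extend E (c.1 + d.1, c.2 + d.2) c x y]
      have hqc : Relation.EqvGen E (c.1 + d.1, c.2 + d.2) c :=
        (hfib _ c hokq hc).mp hrr
      constructor
      · exact Or.inl
      · rintro (h | ⟨h1, h2⟩ | ⟨h1, h2⟩)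
        · exact h
        · exact Relation.EqvGen.trans _ _ _ (Relation.EqvGen.trans _ _ _ h1 hqc) h2
        · exact Relation.EqvGen.trans _ _ _
            (Relation.EqvGen.trans _ _ _ h1 (Relation.EqvGen.symm _ _ hqc)) h2
    case pos =>
    rw [mergeStep, if_neg hd0, if_pos hcq, if_pos hrr]
    set q : Int × Int := (c.1 + d.1, c.2 + d.2) with hqdef
    set ra := lab.getD q q with hradef
    set rb := lab.getD c c with hrbdef
    have hkeys' : (PySem.Dict.mk (lab.items.map (fun kv =>
        (kv.1, if kv.2 = ra then rb else kv.2)))).keys = lab.keys := by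
      simp only [PySem.Dict.keys, List.map_map]
      rfl
    refine ⟨by rw [hkeys']; exact hnd, ?_, ?_⟩
    · intro x
      rw [PySem.Dict.contains_iff_mem_keys, hkeys', ← PySem.Dict.contains_iff_mem_keys]
      exact hkeys x
    · intro x y hx hy
      have hroot : ∀ z, okC M z →
          rootL (PySem.Dict.mk (lab.items.map (fun kv =>
            (kv.1, if kv.2 = ra then rb else kv.2)))) z
            = (if rootL lab z = ra then rb else rootL lab z) := by
        intro z hz
        have hcz : lab.contains z = true := (hkeys z).mpr hz
        rw [PySem.Dict.contains_eq_isSome_get?] at hcz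
        obtain ⟨v, hv⟩ := Option.isSome_iff_exists.mp hcz
        rw [rootL, rootL, PySem.Dict.getD_eq_get?_getD, PySem.Dict.getD_eq_get?_getD,
          get?_mapVal lab (fun r => if r = ra then rb else r) z, hv]
        rfl
      rw [hroot x hx, hroot y hy, eqvgen_extend E q c x y]
      have h1 : rootL lab x = ra ↔ Relation.EqvGen E x q := hfib x q hx hokq
      have h2 : rootL lab y = ra ↔ Relation.EqvGen E y q := hfib y q hy hokq
      have h3 : rootL lab x = rb ↔ Relation.EqvGen E x c := hfib x c hx hc
      have h4 : rootL lab y = rb ↔ Relation.EqvGen E y c := hfib y c hy hc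
      have h5 : rootL lab x = rootL lab y ↔ Relation.EqvGen E x y := hfib x y hx hy
      constructor
      · intro hg
        by_cases hxa : rootL lab x = ra <;> by_cases hya : rootL lab y = ra
        · exact Or.inl (h5.mp (hxa.trans hya.symm))
        · rw [if_pos hxa, if_neg hya] at hg
          exact Or.inr (Or.inl ⟨h1.mp hxa,
            Relation.EqvGen.symm _ _ (h4.mp hg.symm)⟩)
        · rw [if_neg hxa, if_pos hya] at hg
          exact Or.inr (Or.inr ⟨h3.mp hg,
            Relation.EqvGen.symm _ _ (h2.mp hya)⟩)
        · rw [if_neg hxa, if_neg hya] at hg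
          exact Or.inl (h5.mp hg)
      · rintro (h | ⟨ha, hb⟩ | ⟨ha, hb⟩)
        · have := h5.mpr h
          rw [this]
        · have hxa : rootL lab x = ra := h1.mpr ha
          have hyb : rootL lab y = rb := h4.mpr (Relation.EqvGen.symm _ _ hb)
          have hyna : rootL lab y ≠ ra := by rw [hyb]; exact fun hh => hrr hh.symm
          rw [if_pos hxa, if_neg hyna, hyb]
        · have hxb : rootL lab x = rb := h3.mpr ha
          have hya : rootL lab y = ra := h2.mpr (Relation.EqvGen.symm _ _ hb)
          have hxna : rootL lab x ≠ ra := by rw [hxb]; exact fun hh => hrr hh.symm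
          rw [if_neg hxna, if_pos hya, hxb]

lemma mergeCell_spec (M : List (List Int)) (E : (Int × Int) → (Int × Int) → Prop)
    (lab : PySem.Dict (Int × Int) (Int × Int)) (c : Int × Int)
    (hc : okC M c) (h : BInv M E lab) :
    BInv M (fun x y => E x y ∨ (okC M x ∧ x ∈ nbrs c ∧ y = c)) (mergeCell lab c) := by
  have hflat : mergeCell lab c = ([(-1,-1),(-1,0),(-1,1),(0,-1),(0,0),(0,1),(1,-1),(1,0),(1,1)] :
      List (Int × Int)).foldl (fun l o => mergeStep l c o) lab := by
    simp only [mergeCell, List.foldl_cons, List.foldl_nil]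
  rw [hflat]
  have hinner : ∀ (os : List (Int × Int)) (E : (Int × Int) → (Int × Int) → Prop)
      (lab : PySem.Dict (Int × Int) (Int × Int)), BInv M E lab →
      BInv M (fun x y => E x y ∨ (okC M x ∧ y = c ∧
        ∃ o ∈ os, ¬(o.1 = 0 ∧ o.2 = 0) ∧ x = (c.1 + o.1, c.2 + o.2)))
        (os.foldl (fun l o => mergeStep l c o) lab) := by
    intro os
    induction os with
    | nil =>
      intro E lab h
      exact BInv_congr M h (fun x y => by simp)
    | cons o os ih =>
      intro E lab h
      simp only [List.foldl_cons]
      refine BInv_congr M (ih _ _ (mergeStep_spec M E lab c o hc h)) (fun x y => ?_)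
      simp only [List.exists_mem_cons_iff]
      constructor
      · rintro ((h | ⟨hg0, hok, hx, hy⟩) | ⟨hok, hy, o', ho', hg0', hx'⟩)
        · exact Or.inl h
        · exact Or.inr ⟨hok, hy, Or.inl ⟨hg0, hx⟩⟩
        · exact Or.inr ⟨hok, hy, Or.inr ⟨o', ho', hg0', hx'⟩⟩
      · rintro (h | ⟨hok, hy, (⟨hg0, hx⟩ | ⟨o', ho', hg0', hx'⟩)⟩)
        · exact Or.inl (Or.inl h)
        · exact Or.inl (Or.inr ⟨hg0, hok, hx, hy⟩)
        · exact Or.inr ⟨hok, hy, o', ho', hg0', hx'⟩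
  have hoff : ∀ x : Int × Int,
      (∃ o ∈ ([(-1,-1),(-1,0),(-1,1),(0,-1),(0,0),(0,1),(1,-1),(1,0),(1,1)] : List (Int × Int)),
        ¬(o.1 = 0 ∧ o.2 = 0) ∧ x = (c.1 + o.1, c.2 + o.2)) ↔
      (∃ o ∈ offsA, x = (c.1 + o.1, c.2 + o.2)) := by
    intro x
    simp only [offsA, List.exists_mem_cons_iff, List.not_mem_nil, false_and, exists_false,
      or_false]
    norm_num
  refine BInv_congr M (hinner _ E lab h) (fun x y => ?_)
  rw [mem_nbrs_iff c x]
  constructor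
  · rintro (h | ⟨hok, rfl, hcs⟩)
    · exact Or.inl h
    · exact Or.inr ⟨hok, (hoff x).mp hcs, rfl⟩
  · rintro (h | ⟨hok, hcs, rfl⟩)
    · exact Or.inl h
    · exact Or.inr ⟨hok, rfl, (hoff x).mpr hcs⟩

-- labelInit: keys are exactly the ok cells (in scan order), each mapped to itself
lemma labelInit_spec (M : List (List Int)) :
    (labelInit M).keys.Nodup ∧ (∀ c, (labelInit M).contains c = true ↔ okC M c) ∧
    (∀ c r, (labelInit M).get? c = some r → r = c) := by
  have hfold : ∀ (P : List (Nat × Nat)) (d : PySem.Dict (Int × Int) (Int × Int)),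
      (∀ p ∈ P, p.1 < M.length ∧ p.2 < M.headI.length) →
      d.keys.Nodup → (∀ c r, d.get? c = some r → r = c) →
      (P.foldl (fun d p => if pvGrid M p.1 p.2 ≠ 0
          then d.insert ((p.1 : Int), (p.2 : Int)) ((p.1 : Int), (p.2 : Int)) else d) d).keys.Nodup ∧
      (∀ c r, (P.foldl (fun d p => if pvGrid M p.1 p.2 ≠ 0
          then d.insert ((p.1 : Int), (p.2 : Int)) ((p.1 : Int), (p.2 : Int)) else d) d).get? c = some r → r = c) ∧
      (∀ c, (P.foldl (fun d p => if pvGrid M p.1 p.2 ≠ 0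
          then d.insert ((p.1 : Int), (p.2 : Int)) ((p.1 : Int), (p.2 : Int)) else d) d).contains c = true ↔
        (d.contains c = true ∨ (okC M c ∧ ∃ p ∈ P, c = ((p.1 : Int), (p.2 : Int))))) := by
    intro P
    induction P with
    | nil =>
      intro d hb hnd hself
      exact ⟨hnd, hself, fun c => by simp⟩
    | cons p P ih =>
      intro d hb hnd hself
      simp only [List.foldl_cons]
      by_cases hg : pvGrid M (p.1 : Int) (p.2 : Int) ≠ 0
      · rw [if_pos hg]
        have hbp := hb p List.mem_cons_self
        have hokp : okC M ((p.1 : Int), (p.2 : Int)) := by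
          rw [okC_iff]
          refine ⟨?_, ?_, ?_, ?_, hg⟩ <;> simp <;> omega
        obtain ⟨g1, g2, g3⟩ := ih (d.insert ((p.1 : Int), (p.2 : Int)) ((p.1 : Int), (p.2 : Int)))
          (fun p' hp' => hb p' (List.mem_cons_of_mem _ hp'))
          (PySem.Dict.nodup_keys_insert _ _ _ hnd)
          (by
            intro c r hcr
            rw [PySem.Dict.get?_insert] at hcr
            split_ifs at hcr with hck
            · subst hck; exact (Option.some_inj.mp hcr).symm
            · exact hself c r hcr)
        refine ⟨g1, g2, fun c => ?_⟩
        rw [g3 c, PySem.Dict.contains_insert]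
        simp only [List.exists_mem_cons_iff, Bool.or_eq_true, beq_iff_eq]
        constructor
        · rintro ((rfl | hdc) | ⟨hok, hex⟩)
          · exact Or.inr ⟨hokp, Or.inl rfl⟩
          · exact Or.inl hdc
          · exact Or.inr ⟨hok, Or.inr hex⟩
        · rintro (hdc | ⟨hok, (rfl | hex)⟩)
          · exact Or.inl (Or.inr hdc)
          · exact Or.inl (Or.inl rfl)
          · exact Or.inr ⟨hok, hex⟩
      · rw [if_neg hg]
        obtain ⟨g1, g2, g3⟩ := ih d (fun p' hp' => hb p' (List.mem_cons_of_mem _ hp')) hnd hself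
        refine ⟨g1, g2, fun c => ?_⟩
        rw [g3 c]
        simp only [List.exists_mem_cons_iff]
        constructor
        · rintro (hdc | ⟨hok, hex⟩)
          · exact Or.inl hdc
          · exact Or.inr ⟨hok, Or.inr hex⟩
        · rintro (hdc | ⟨hok, (rfl | hex)⟩)
          · exact Or.inl hdc
          · exfalso
            rw [okC_iff] at hok
            exact hg hok.2.2.2.2
          · exact Or.inr ⟨hok, hex⟩
  have hrw : labelInit M = (pairsL M.length M.headI.length).foldl
      (fun d p => if pvGrid M p.1 p.2 ≠ 0
        then d.insert ((p.1 : Int), (p.2 : Int)) ((p.1 : Int), (p.2 : Int)) else d)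
      PySem.Dict.empty := by
    rw [labelInit]
    exact foldl_nested_eq_pairs (fun d i j => if pvGrid M (i : Int) (j : Int) ≠ 0
      then d.insert ((i : Int), (j : Int)) ((i : Int), (j : Int)) else d) M.length M.headI.length
      PySem.Dict.empty
  obtain ⟨g1, g2, g3⟩ := hfold (pairsL M.length M.headI.length) PySem.Dict.empty
    (fun p hp => (mem_pairsL _ _ p).mp hp)
    (by exact List.nodup_nil)
    (by intro c r hcr; rw [PySem.Dict.get?_empty] at hcr; exact absurd hcr (by simp))
  rw [hrw]
  refine ⟨g1, fun c => ?_, g2⟩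
  rw [g3 c]
  simp only [PySem.Dict.contains_empty, Bool.false_eq_true, false_or]
  constructor
  · rintro ⟨hok, _⟩; exact hok
  · intro hok
    refine ⟨hok, ⟨c.1.toNat, c.2.toNat⟩, ?_, ?_⟩
    · rw [okC_iff] at hok
      rw [mem_pairsL]
      constructor <;> simp <;> omega
    · rw [okC_iff] at hok
      exact Prod.ext (by simp; omega) (by simp; omega)

-- the counting loop: best = the largest multiplicity among the roots of the keys
lemma count_loop (lab : PySem.Dict (Int × Int) (Int × Int)) :
    ∀ (K : List (Int × Int)) (counts : PySem.Dict (Int × Int) Int) (best : Int)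
      (R : List (Int × Int)),
      (∀ r, counts.getD r 0 = (R.count r : Int)) →
      (∀ r, ((R.count r : Int) ≤ best)) →
      (best = 0 ∨ ∃ r₀ ∈ R, ((R.count r₀ : Int) = best)) →
      (∀ r, (((R ++ K.map (rootL lab)).count r : Int)
          ≤ (K.foldl (countStep lab) (counts, best)).2)) ∧
      ((K.foldl (countStep lab) (counts, best)).2 = 0 ∨
        ∃ r₀ ∈ R ++ K.map (rootL lab), (((R ++ K.map (rootL lab)).count r₀ : Int)
          = (K.foldl (countStep lab) (counts, best)).2)) := by
  intro K
  induction K with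
  | nil =>
    intro counts best R h1 h2 h3
    refine ⟨fun r => ?_, ?_⟩
    · simpa using h2 r
    · simpa using h3
  | cons cc K ih =>
    intro counts best R h1 h2 h3
    simp only [List.foldl_cons, List.map_cons]
    have hcc : rootL lab cc = lab.getD cc cc := rfl
    set r : Int × Int := lab.getD cc cc with hrdef
    set cnt : Int := counts.getD r 0 + 1 with hcnt
    have hcntR : cnt = (R.count r : Int) + 1 := by rw [hcnt, h1]
    set best' : Int := if cnt > best then cnt else best with hbest'
    have hstep : countStep lab (counts, best) cc = (counts.insert r cnt, best') := rfl
    rw [hstep]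
    have hcount1 : ∀ r', (R ++ [r]).count r' = R.count r' + if r' = r then 1 else 0 := by
      intro r'
      rw [List.count_append, List.count_cons, List.count_nil]
      by_cases hrr : r' = r
      · subst hrr; simp
      · simp only [beq_iff_eq, Nat.zero_add]
        rw [if_neg (fun h => hrr h.symm), if_neg hrr]
    have h1' : ∀ r', (counts.insert r cnt).getD r' 0 = ((R ++ [r]).count r' : Int) := by
      intro r'
      rw [PySem.Dict.getD_insert, hcount1 r']
      split_ifs with hrr
      · subst hrr; rw [hcntR]; push_cast; ring
      · rw [h1]; push_cast; ring
    have h2' : ∀ r', ((R ++ [r]).count r' : Int) ≤ best' := by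
      intro r'
      have hb2 := h2 r'
      have hb3 := h2 r
      have hcR := hcntR
      rw [hcount1 r', hbest']
      by_cases hrr : r' = r
      · subst hrr
        rw [if_pos rfl]
        split_ifs with hgt <;> push_cast <;> omega
      · rw [if_neg hrr]
        split_ifs with hgt <;> push_cast <;> omega
    have h3' : best' = 0 ∨ ∃ r₀ ∈ R ++ [r], ((R ++ [r]).count r₀ : Int) = best' := by
      rw [hbest']
      split_ifs with hgt
      · right
        refine ⟨r, List.mem_append_right _ (List.mem_singleton.mpr rfl), ?_⟩
        rw [hcount1 r, if_pos rfl, hcntR]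
        push_cast; ring
      · rcases h3 with h0 | ⟨r₀, hr₀, hc⟩
        · left; exact h0
        · right
          refine ⟨r₀, List.mem_append_left _ hr₀, ?_⟩
          rw [hcount1 r₀]
          split_ifs with hrr
          · subst hrr
            rw [hcntR] at hgt
            exfalso
            omega
          · rw [← hc]; push_cast; ring
    obtain ⟨g1, g2⟩ := ih (counts.insert r cnt) best' (R ++ [r]) h1' h2' h3'
    constructor
    · intro r'
      have := g1 r'
      rwa [List.append_assoc, List.singleton_append] at this
    · rcases g2 with h0 | ⟨r₀, hr₀, hc⟩
      · left; exact h0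
      · right
        refine ⟨r₀, ?_, ?_⟩
        · rwa [List.append_assoc, List.singleton_append] at hr₀
        · rwa [List.append_assoc, List.singleton_append] at hc

lemma B_char (M : List (List Int)) : CharMax M (max_one_area_alt M) := by
  obtain ⟨hnd0, hcont0, hself0⟩ := labelInit_spec M
  have hroot0 : ∀ x, rootL (labelInit M) x = x := by
    intro x
    rw [rootL, PySem.Dict.getD_eq_get?_getD]
    cases hx : (labelInit M).get? x with
    | none => rfl
    | some r => simpa using hself0 x r hx
  have hinv0 : BInv M (fun _ _ => False) (labelInit M) := by
    refine ⟨hnd0, hcont0, fun x y _ _ => ?_⟩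
    rw [hroot0 x, hroot0 y, eqvgen_bot]
  have houter : ∀ (P : List (Int × Int)) (E : (Int × Int) → (Int × Int) → Prop)
      (lab : PySem.Dict (Int × Int) (Int × Int)), BInv M E lab →
      (∀ c ∈ P, okC M c) →
      BInv M (fun x y => E x y ∨ (okC M x ∧ ∃ c ∈ P, x ∈ nbrs c ∧ y = c))
        (P.foldl mergeCell lab) := by
    intro P
    induction P with
    | nil =>
      intro E lab h _
      exact BInv_congr M h (fun x y => by simp)
    | cons c P ihp =>
      intro E lab h hP
      simp only [List.foldl_cons]
      refine BInv_congr M (ihp _ _ (mergeCell_spec M E lab c (hP c List.mem_cons_self) h)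
        (fun c' hc' => hP c' (List.mem_cons_of_mem _ hc'))) (fun x y => ?_)
      simp only [List.exists_mem_cons_iff]
      constructor
      · rintro ((h | ⟨hok, hn, hy⟩) | ⟨hok, c', hc', hn', hy'⟩)
        · exact Or.inl h
        · exact Or.inr ⟨hok, Or.inl ⟨hn, hy⟩⟩
        · exact Or.inr ⟨hok, Or.inr ⟨c', hc', hn', hy'⟩⟩
      · rintro (h | ⟨hok, (⟨hn, hy⟩ | ⟨c', hc', hn', hy'⟩)⟩)
        · exact Or.inl (Or.inl h)
        · exact Or.inl (Or.inr ⟨hok, hn, hy⟩)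
        · exact Or.inr ⟨hok, c', hc', hn', hy'⟩
  have hkeysok : ∀ c, c ∈ (labelInit M).keys ↔ okC M c := by
    intro c; rw [← PySem.Dict.contains_iff_mem_keys]; exact hcont0 c
  have hfinal : BInv M (EFull M) ((labelInit M).keys.foldl mergeCell (labelInit M)) := by
    refine BInv_congr M (houter (labelInit M).keys _ _ hinv0
      (fun c hc => (hkeysok c).mp hc)) (fun x y => ?_)
    simp only [false_or, EFull]
    constructor
    · rintro ⟨hok, c, hc, hn, heq⟩
      subst heq
      exact ⟨hok, (hkeysok _).mp hc, hn⟩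
    · rintro ⟨hok, hoky, hn⟩
      exact ⟨hok, y, (hkeysok y).mpr hoky, hn, rfl⟩
  set labF := (labelInit M).keys.foldl mergeCell (labelInit M) with hlabF
  obtain ⟨hndF, hcontF, hfibF⟩ := hfinal
  have hK : ∀ c, c ∈ labF.keys ↔ okC M c := by
    intro c; rw [← PySem.Dict.contains_iff_mem_keys]; exact hcontF c
  -- count of p's root among the roots of all keys = size of p's component
  have hcount : ∀ p, okC M p →
      (((labF.keys.map (rootL labF)).count (rootL labF p) : Int)) = (Scomp M p : Int) := by
    intro p hp
    set q : (Int × Int) → Bool := fun c => rootL labF c == rootL labF p with hq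
    have hc1 : (labF.keys.map (rootL labF)).count (rootL labF p) = labF.keys.countP q := by
      rw [List.count_eq_countP, List.countP_map]
      rfl
    have hc2 : labF.keys.countP q = (labF.keys.filter q).length :=
      List.countP_eq_length_filter ..
    have hsets : compSet M p = {x | x ∈ labF.keys.filter q} := by
      ext x
      simp only [compSet, Set.mem_setOf_eq, List.mem_filter, hq, beq_iff_eq]
      constructor
      · intro hx
        have hokx : okC M x := Rch_ok M hp hx
        refine ⟨(hK x).mpr hokx, ?_⟩
        exact (hfibF x p hokx hp).mpr ((eqvgen_iff_Rch M hokx).mpr (Rch_symm M hp hx))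
      · rintro ⟨hxK, hroot⟩
        have hokx : okC M x := (hK x).mp hxK
        exact Rch_symm M hokx ((eqvgen_iff_Rch M hokx).mp ((hfibF x p hokx hp).mp hroot))
    have hlen : (Scomp M p : Int) = ((labF.keys.filter q).length : Int) := by
      rw [Scomp, hsets, ← List.coe_toFinset, Set.ncard_coe_finset,
        List.toFinset_card_of_nodup (List.Nodup.filter _ hndF)]
    rw [hc1, hc2, hlen]
  have hval : max_one_area_alt M = (labF.keys.foldl (countStep labF) (PySem.Dict.empty, 0)).2 :=
    rfl
  obtain ⟨hbd, hat⟩ := count_loop labF labF.keys PySem.Dict.empty 0 []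
    (fun r => by simp) (fun r => by simp) (Or.inl rfl)
  rw [hval]
  constructor
  · intro p hp
    have := hbd (rootL labF p)
    rw [List.nil_append] at this
    rwa [hcount p hp] at this
  · rcases hat with h0 | ⟨r₀, hr₀, hc⟩
    · left; exact h0
    · right
      rw [List.nil_append] at hr₀ hc
      obtain ⟨c, hcK, rfl⟩ := List.mem_map.mp hr₀
      have hokc : okC M c := (hK c).mp hcK
      exact ⟨c, hokc, by rw [← hc, hcount c hokc]⟩

-- ===== VERDICT (by name: the statement is the Claim_ definition above) =====
theorem max_one_area_spec : Claim_equal_max_one_area := by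
  intro M _hdom _hpre
  unfold Spec_max_one_area
  exact CharMax_unique M (A_char M) (B_char M)
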